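-- pv_equiv track=rewrite | github.com/hyun031916/2020-Coding-Test | 수업시간11.py | solution
-- ===== SOURCE A (Python) =====
-- def solution(calorie):
--    min_cal = 0
--    answer = 0
--    min_cal = calorie[0]
--    for cal in calorie:
--        if cal > min_cal:
--            answer += cal - min_cal
--        min_cal = min(min_cal, cal)
--    return answer
-- ===== SOURCE B (Python) =====
-- def solution(calorie):
--     m = calorie[0]
--     pm = []
--     for c in calorie:
--         m = min(m, c)
--         pm.append(m)
--     return sum(c - m for c, m in zip(calorie, pm))
-- ===== Notes on version B (the rewrite author's own statement) =====
-- stated objective: simpler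
-- what changed: Two separate passes (an inclusive prefix-minimum list, then a branch-free zip summation of c - min) replace A's single fused loop with an 'if cal > min_cal' branch and interleaved minimum update.
import Mathlib
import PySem

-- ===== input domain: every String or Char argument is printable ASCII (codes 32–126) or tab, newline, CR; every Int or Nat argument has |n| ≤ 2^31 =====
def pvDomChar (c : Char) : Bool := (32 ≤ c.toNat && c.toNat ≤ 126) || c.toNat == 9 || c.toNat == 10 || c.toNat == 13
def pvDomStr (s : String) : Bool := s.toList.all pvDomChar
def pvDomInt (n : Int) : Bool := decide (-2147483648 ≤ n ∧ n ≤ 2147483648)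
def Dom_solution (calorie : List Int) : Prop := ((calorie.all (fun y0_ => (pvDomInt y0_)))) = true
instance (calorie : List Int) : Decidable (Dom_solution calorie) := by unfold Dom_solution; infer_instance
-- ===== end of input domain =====

-- B: two-pass prefix-minimum list + branch-free zip summation instead of A's fused loop with a branch (simpler decomposition).


-- ===== PORT A =====
-- literal port of A: min_cal = calorie[0]; fused loop keeping (answer, min_cal)
def solution (calorie : List Int) : Int :=
  match PySem.List.pyGet? calorie 0 with
  | none => 0   -- Python raises IndexError here; excluded by Pre_solution
  | some m0 =>
    (calorie.foldl
      (fun (s : Int × Int) cal =>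
        ((if cal > s.2 then s.1 + (cal - s.2) else s.1), min s.2 cal))
      (0, m0)).1

-- ===== PORT B =====
-- literal port of B: build the inclusive prefix-minimum list pm, then sum c - m over zip
def solution_alt (calorie : List Int) : Int :=
  match PySem.List.pyGet? calorie 0 with
  | none => 0   -- Python raises IndexError here; excluded by Pre_solution
  | some m0 =>
    let pm := (calorie.foldl
      (fun (s : Int × List Int) c => (min s.1 c, s.2 ++ [min s.1 c]))
      (m0, ([] : List Int))).2
    ((calorie.zip pm).map (fun p => p.1 - p.2)).sum

-- ===== PRECONDITION & SPEC =====
-- A reads the first element up front, so the empty list raises IndexError and is excluded.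
def Pre_solution (calorie : List Int) : Prop := calorie ≠ []
instance (calorie : List Int) : Decidable (Pre_solution calorie) := by unfold Pre_solution; infer_instance
def pvWitness_solution : List Int := [3, 1, 2]

def Spec_solution (calorie : List Int) (out : Int) : Prop := out = solution_alt calorie
instance (calorie : List Int) (out : Int) : Decidable (Spec_solution calorie out) := by unfold Spec_solution; infer_instance

-- ===== CLAIM (what is proved, stated in full; the proofs are below) =====
def Claim_equal_solution : Prop := ∀ (calorie : List Int), Dom_solution calorie → Pre_solution calorie → Spec_solution calorie (solution calorie)

-- ===== LEMMAS AND PROOFS =====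

-- common recursive description: sum of (c - running inclusive prefix min)
def pvF (l : List Int) (m : Int) : Int :=
  match l with
  | [] => 0
  | c :: t => (c - min m c) + pvF t (min m c)

-- the inclusive prefix-minimum list
def pvPM (l : List Int) (m : Int) : List Int :=
  match l with
  | [] => []
  | c :: t => min m c :: pvPM t (min m c)

theorem pvA_fold (l : List Int) (a m : Int) :
    (l.foldl (fun (s : Int × Int) cal =>
        ((if cal > s.2 then s.1 + (cal - s.2) else s.1), min s.2 cal)) (a, m)).1
      = a + pvF l m := by
  induction l generalizing a m with
  | nil => simp [pvF]
  | cons c t ih =>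
    simp only [List.foldl, pvF, ih]
    by_cases h : c > m
    · have : min m c = m := by omega
      simp [h, this]; ring
    · have h1 : min m c = c := by omega
      simp [h, h1]

theorem pvB_fold (l : List Int) (m : Int) (acc : List Int) :
    (l.foldl (fun (s : Int × List Int) c => (min s.1 c, s.2 ++ [min s.1 c])) (m, acc)).2
      = acc ++ pvPM l m := by
  induction l generalizing m acc with
  | nil => simp [pvPM]
  | cons c t ih => simp [List.foldl, pvPM, ih]

theorem pvZip_sum (l : List Int) (m : Int) :
    ((l.zip (pvPM l m)).map (fun p => p.1 - p.2)).sum = pvF l m := by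
  induction l generalizing m with
  | nil => simp [pvF]
  | cons c t ih => simp [pvPM, pvF, ih]

-- ===== VERDICT (by name: the statement is the Claim_ definition above) =====
theorem solution_spec : Claim_equal_solution := by
  intro calorie _ _
  unfold Spec_solution solution solution_alt
  cases h : PySem.List.pyGet? calorie 0 with
  | none => rfl
  | some m0 => simp only [pvA_fold, pvB_fold, List.nil_append, pvZip_sum, Int.zero_add]
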